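-- pv_equiv track=rewrite | github.com/ansh9690/HackerearthSolutions | Maximum operations.py | myXNOR
-- ===== SOURCE A (Python) =====
-- def swap(a,b):
-- 	temp=a
-- 	a=b
-- 	b=temp
--
-- def myXNOR(a, b):
-- 	if (a < b):
-- 		swap(a, b)
-- 	if (a == 0 and b == 0) :
-- 		return 1;
-- 	a_rem = 0
-- 	b_rem = 0
-- 	count = 0
-- 	xnornum = 0
-- 	while (a!=0) :
-- 		a_rem = a & 1
-- 		b_rem = b & 1
-- 		if (a_rem == b_rem):
-- 			xnornum |= (1 << count)
-- 		count=count+1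
--
-- 		a = a >> 1
-- 		b = b >> 1
--
-- 	return xnornum;
-- ===== SOURCE B (Python) =====
-- def myXNOR(a, b):
--     if a == 0 and b == 0:
--         return 1
--     return ~(a ^ b) % (1 << a.bit_length())
-- ===== Notes on version B (the rewrite author's own statement) =====
-- stated objective: simpler
-- what changed: Replaces the bit-by-bit while-loop (and the no-op swap call) with a single closed-form expression: XNOR over a.bit_length() bits is the complement of a^b reduced modulo 1 << a.bit_length().
import Mathlib
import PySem

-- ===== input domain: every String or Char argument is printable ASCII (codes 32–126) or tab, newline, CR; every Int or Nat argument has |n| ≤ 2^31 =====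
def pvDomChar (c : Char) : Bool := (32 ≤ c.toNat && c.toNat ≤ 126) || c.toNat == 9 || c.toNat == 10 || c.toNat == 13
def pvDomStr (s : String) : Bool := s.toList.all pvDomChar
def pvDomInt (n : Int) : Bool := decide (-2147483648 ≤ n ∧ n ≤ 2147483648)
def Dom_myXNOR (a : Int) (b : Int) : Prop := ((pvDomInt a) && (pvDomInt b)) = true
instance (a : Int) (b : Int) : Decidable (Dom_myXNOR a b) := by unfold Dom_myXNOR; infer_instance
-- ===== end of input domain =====

-- B replaces A's bit-by-bit while-loop by the closed form ~(a ^ b) % (1 << a.bit_length()); objective: simpler.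

-- ===== PORT A =====
-- Python's swap rebinds its own locals only; it returns None and has no effect on the caller.
def swap (_a _b : Int) : Unit := ()

-- the 'while (a != 0)' loop of A; for a < 0 Python never terminates (excluded by Pre_), we return 0 there.
def myXNORloop (a b : Int) (count : Nat) (xnornum : Int) : Int :=
  if _h : a ≠ 0 then
    let a_rem := PySem.Int.band a 1
    let b_rem := PySem.Int.band b 1
    let xnornum' := if a_rem = b_rem then PySem.Int.bor xnornum (1 <<< count) else xnornum
    if _h2 : 0 < a then
      myXNORloop (a >>> 1) (b >>> 1) (count + 1) xnornum'
    else 0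
  else xnornum
termination_by a.toNat
decreasing_by
  rcases a with n | n
  · show (Int.ofNat (n >>> 1)).toNat < (Int.ofNat n).toNat
    have hn : n ≠ 0 := by simpa using _h
    have h1 : n >>> 1 = n / 2 := by simpa using Nat.shiftRight_eq_div_pow n 1
    simp only [Int.toNat_natCast, Int.ofNat_eq_natCast]
    omega
  · exact absurd _h2 (by omega)

def myXNOR (a : Int) (b : Int) : Int :=
  let _ := if a < b then swap a b else ()
  if a = 0 ∧ b = 0 then 1
  else myXNORloop a b 0 0

-- ===== PORT B =====
def myXNOR_alt (a : Int) (b : Int) : Int :=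
  if a = 0 ∧ b = 0 then 1
  else PySem.Int.mod (Int.not (PySem.Int.bxor a b)) (1 <<< PySem.Int.bitLength a)

-- ===== PRECONDITION & SPEC =====
-- Pre_ excludes a < 0, on which A's while-loop never terminates (a >> 1 stays -1), so A returns no value there.
def Pre_myXNOR (a : Int) (b : Int) : Prop := 0 ≤ a
instance (a : Int) (b : Int) : Decidable (Pre_myXNOR a b) := by unfold Pre_myXNOR; infer_instance
def pvWitness_myXNOR : Int × Int := (6, 3)

def Spec_myXNOR (a : Int) (b : Int) (out : Int) : Prop := out = myXNOR_alt a b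
instance (a : Int) (b : Int) (out : Int) : Decidable (Spec_myXNOR a b out) := by unfold Spec_myXNOR; infer_instance

-- ===== CLAIM (what is proved, stated in full; the proofs are below) =====
def Claim_equal_myXNOR : Prop := ∀ (a : Int) (b : Int), Dom_myXNOR a b → Pre_myXNOR a b → Spec_myXNOR a b (myXNOR a b)

-- ===== LEMMAS AND PROOFS =====

-- Nat: or-ing in a fresh high bit is addition
theorem lor_two_pow_of_lt (c : Nat) : ∀ x : Nat, x < 2 ^ c → x ||| 2 ^ c = x + 2 ^ c := by
  induction c with
  | zero => intro x hx; interval_cases x; decide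
  | succ c ih =>
    intro x hx
    have h2 : 2 ^ (c + 1) = Nat.bit false (2 ^ c) := by simp [Nat.bit]; ring
    rcases Nat.mod_two_eq_zero_or_one x with h | h
    · have hx' : Nat.bit false (x / 2) = x := by simp [Nat.bit]; omega
      calc x ||| 2 ^ (c + 1) = Nat.bit false (x / 2) ||| Nat.bit false (2 ^ c) := by rw [hx', h2]
      _ = Nat.bit (false || false) (x / 2 ||| 2 ^ c) := Nat.lor_bit _ _ _ _
      _ = Nat.bit false (x / 2 + 2 ^ c) := by rw [ih (x/2) (by omega)]; simp
      _ = x + 2 ^ (c + 1) := by simp [Nat.bit]; omega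
    · have hx' : Nat.bit true (x / 2) = x := by simp [Nat.bit]; omega
      calc x ||| 2 ^ (c + 1) = Nat.bit true (x / 2) ||| Nat.bit false (2 ^ c) := by rw [hx', h2]
      _ = Nat.bit (true || false) (x / 2 ||| 2 ^ c) := Nat.lor_bit _ _ _ _
      _ = Nat.bit true (x / 2 + 2 ^ c) := by rw [ih (x/2) (by omega)]; simp
      _ = x + 2 ^ (c + 1) := by simp [Nat.bit]; omega

-- shifting right by one is Python's floor division by two
theorem shiftRight_one_eq_fdiv (x : Int) : x >>> 1 = PySem.Int.floordiv x 2 := by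
  rcases x with n | n
  · show Int.ofNat (n >>> 1) = _
    have h1 : n >>> 1 = n / 2 := by simpa using Nat.shiftRight_eq_div_pow n 1
    rw [h1]
    exact_mod_cast (PySem.Int.floordiv_natCast n 2).symm
  · show Int.negSucc (n >>> 1) = _
    have h1 : n >>> 1 = n / 2 := by simpa using Nat.shiftRight_eq_div_pow n 1
    rw [h1, PySem.Int.floordiv_eq_ediv_of_pos (by omega), Int.negSucc_eq]
    omega

-- Int.not is the arithmetic complement
theorem not_eq_neg_sub_one (x : Int) : Int.not x = -x - 1 := by
  rcases x with n | n <;> simp [Int.not, Int.negSucc_eq] <;> ring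

theorem negSucc_not_nonneg' (k : Nat) : ¬ (0 ≤ Int.negSucc k) := by rw [Int.negSucc_eq]; omega

-- PySem.Int.bxor on the two Int constructors
theorem bxor_ofNat_ofNat (m k : Nat) :
    PySem.Int.bxor (Int.ofNat m) (Int.ofNat k) = Int.ofNat (m ^^^ k) := by
  exact_mod_cast PySem.Int.bxor_natCast m k

theorem bxor_ofNat_negSucc (m k : Nat) :
    PySem.Int.bxor (Int.ofNat m) (Int.negSucc k) = Int.negSucc (m ^^^ k) := by
  show (if 0 ≤ Int.ofNat m then if 0 ≤ Int.negSucc k then _ else _ else _) = _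
  rw [if_pos (show 0 ≤ Int.ofNat m from Int.natCast_nonneg m), if_neg (negSucc_not_nonneg' k)]
  have h1 : ((-Int.negSucc k - 1).toNat) = k := by rw [Int.negSucc_eq]; omega
  have h2 : (Int.ofNat m).toNat = m := rfl
  rw [h1, h2, Int.negSucc_eq]; ring

theorem bxor_negSucc_ofNat (m k : Nat) :
    PySem.Int.bxor (Int.negSucc m) (Int.ofNat k) = Int.negSucc (m ^^^ k) := by
  show (if 0 ≤ Int.negSucc m then _ else if 0 ≤ Int.ofNat k then _ else _) = _
  rw [if_neg (negSucc_not_nonneg' m), if_pos (show 0 ≤ Int.ofNat k from Int.natCast_nonneg k)]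
  have h1 : ((-Int.negSucc m - 1).toNat) = m := by rw [Int.negSucc_eq]; omega
  have h2 : (Int.ofNat k).toNat = k := rfl
  rw [h1, h2, Int.negSucc_eq]; ring

theorem bxor_negSucc_negSucc (m k : Nat) :
    PySem.Int.bxor (Int.negSucc m) (Int.negSucc k) = Int.ofNat (m ^^^ k) := by
  show (if 0 ≤ Int.negSucc m then _ else if 0 ≤ Int.negSucc k then _ else _) = _
  rw [if_neg (negSucc_not_nonneg' m), if_neg (negSucc_not_nonneg' k)]
  have h1 : ((-Int.negSucc m - 1).toNat) = m := by rw [Int.negSucc_eq]; omega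
  have h2 : ((-Int.negSucc k - 1).toNat) = k := by rw [Int.negSucc_eq]; omega
  rw [h1, h2]; rfl

theorem shiftRight_ofNat' (m : Nat) : Int.ofNat m >>> 1 = Int.ofNat (m >>> 1) := rfl
theorem shiftRight_negSucc' (m : Nat) : Int.negSucc m >>> 1 = Int.negSucc (m >>> 1) := rfl
theorem not_ofNat' (m : Nat) : Int.not (Int.ofNat m) = Int.negSucc m := rfl
theorem not_negSucc' (m : Nat) : Int.not (Int.negSucc m) = Int.ofNat m := rfl

-- ~(a ^ b) shifted right once is ~((a >> 1) ^ (b >> 1))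
theorem not_bxor_shiftRight (a b : Int) :
    Int.not (PySem.Int.bxor a b) >>> 1 = Int.not (PySem.Int.bxor (a >>> 1) (b >>> 1)) := by
  rcases a with m | m <;> rcases b with k | k <;>
    simp only [shiftRight_ofNat', shiftRight_negSucc', bxor_ofNat_ofNat, bxor_ofNat_negSucc,
      bxor_negSucc_ofNat, bxor_negSucc_negSucc, not_ofNat', not_negSucc',
      Nat.shiftRight_xor_distrib]

-- the low bit of ~(a ^ b) is the XNOR of the low bits of a and b
theorem mod_not_bxor_two (a b : Int) :
    PySem.Int.mod (Int.not (PySem.Int.bxor a b)) 2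
      = if PySem.Int.mod a 2 = PySem.Int.mod b 2 then 1 else 0 := by
  rw [PySem.Int.mod_eq_emod_of_pos (by omega), PySem.Int.mod_eq_emod_of_pos (by omega),
      PySem.Int.mod_eq_emod_of_pos (by omega), not_eq_neg_sub_one]
  rcases a with m | m <;> rcases b with k | k
  · rw [bxor_ofNat_ofNat]
    have hx : (m ^^^ k) % 2 = (m + k) % 2 := Nat.xor_mod_two_eq
    simp only [Int.ofNat_eq_natCast]; split_ifs <;> omega
  · rw [bxor_ofNat_negSucc]
    have hx : (m ^^^ k) % 2 = (m + k) % 2 := Nat.xor_mod_two_eq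
    simp only [Int.ofNat_eq_natCast, Int.negSucc_eq]; split_ifs <;> omega
  · rw [bxor_negSucc_ofNat]
    have hx : (m ^^^ k) % 2 = (m + k) % 2 := Nat.xor_mod_two_eq
    simp only [Int.ofNat_eq_natCast, Int.negSucc_eq]; split_ifs <;> omega
  · rw [bxor_negSucc_negSucc]
    have hx : (m ^^^ k) % 2 = (m + k) % 2 := Nat.xor_mod_two_eq
    simp only [Int.ofNat_eq_natCast, Int.negSucc_eq]; split_ifs <;> omega

-- splitting a power-of-two modulus into the low bit and the rest
theorem mod_two_pow_succ (x : Int) (m : Nat) :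
    PySem.Int.mod x (2 ^ (m + 1)) = PySem.Int.mod x 2 + 2 * PySem.Int.mod (x >>> 1) (2 ^ m) := by
  rw [shiftRight_one_eq_fdiv, PySem.Int.floordiv_eq_ediv_of_pos (by omega : (0:Int) < 2),
      PySem.Int.mod_eq_emod_of_pos (by positivity), PySem.Int.mod_eq_emod_of_pos (by omega),
      PySem.Int.mod_eq_emod_of_pos (by positivity)]
  set q : Int := x / 2 with hq
  have hx : x = 2 * q + x % 2 := by omega
  have hqd : q = 2 ^ m * (q / 2 ^ m) + q % 2 ^ m := (Int.mul_ediv_add_emod q (2^m)).symm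
  have hrw : x = (x % 2 + 2 * (q % 2 ^ m)) + 2 ^ (m + 1) * (q / 2 ^ m) := by
    rw [pow_succ]; nlinarith [hx, hqd]
  have h1 : (0:Int) ≤ x % 2 + 2 * (q % 2 ^ m) := by
    have := Int.emod_nonneg q (by positivity : (2:Int)^m ≠ 0)
    omega
  have h2 : x % 2 + 2 * (q % 2 ^ m) < 2 ^ (m + 1) := by
    have := Int.emod_lt_of_pos q (by positivity : (0:Int) < 2^m)
    rw [pow_succ]; omega
  calc x % 2 ^ (m + 1)
      = ((x % 2 + 2 * (q % 2 ^ m)) + 2 ^ (m + 1) * (q / 2 ^ m)) % 2 ^ (m + 1) := by rw [← hrw]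
  _ = (x % 2 + 2 * (q % 2 ^ m)) % 2 ^ (m + 1) := by rw [Int.add_mul_emod_self_left]
  _ = x % 2 + 2 * (q % 2 ^ m) := Int.emod_eq_of_lt h1 h2

theorem one_shiftLeft_int (c : Nat) : ((1 <<< c : Nat) : Int) = (2 : Int) ^ c := by
  rw [Nat.one_shiftLeft]; push_cast; ring

-- or-ing a fresh high bit into the accumulator is addition (Int version)
theorem bor_high_bit (xn : Int) (c : Nat) (h0 : 0 ≤ xn) (h1 : xn < 2 ^ c) :
    PySem.Int.bor xn ((1 <<< c : Nat) : Int) = xn + 2 ^ c := by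
  rw [Nat.one_shiftLeft]
  have hpow : (((2:Nat)^c : Nat) : Int) = (2:Int)^c := by push_cast; ring
  have hlt' : xn.toNat < 2^c := by omega
  rw [PySem.Int.bor_of_nonneg h0 (by positivity), Int.toNat_natCast,
      lor_two_pow_of_lt c xn.toNat hlt']
  push_cast
  omega

-- main loop invariant: the loop adds, above the bits already in xn, the closed form of B
theorem loop_closed_form : ∀ (k : Nat) (a : Int), a.toNat = k → 0 ≤ a → ∀ (b xn : Int) (c : Nat),
    0 ≤ xn → xn < 2 ^ c →
    myXNORloop a b c xn
      = xn + 2 ^ c * PySem.Int.mod (Int.not (PySem.Int.bxor a b)) (2 ^ PySem.Int.bitLength a) := by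
  intro k
  induction k using Nat.strong_induction_on with
  | _ k ih =>
    intro a hak ha0 b xn c hxn0 hxnc
    by_cases hz : a = 0
    · subst hz
      rw [myXNORloop]
      simp only [ne_eq, not_true_eq_false, dite_false]
      rw [PySem.Int.bitLength_zero]
      rw [pow_zero, PySem.Int.mod_eq_emod_of_pos (by omega), Int.emod_one]
      simp
    · have hpos : 0 < a := lt_of_le_of_ne ha0 (Ne.symm hz)
      rw [myXNORloop]
      rw [dif_pos hz, dif_pos hpos]
      have hshift0 : 0 ≤ a >>> 1 := by
        rw [shiftRight_one_eq_fdiv, PySem.Int.floordiv_eq_ediv_of_pos (by omega)]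
        exact Int.ediv_nonneg ha0 (by omega)
      have hlt : (a >>> 1).toNat < k := by
        rw [shiftRight_one_eq_fdiv, PySem.Int.floordiv_eq_ediv_of_pos (by omega)]
        omega
      have hbl : PySem.Int.bitLength a = PySem.Int.bitLength (a >>> 1) + 1 := by
        rw [shiftRight_one_eq_fdiv]; exact PySem.Int.bitLength_of_pos hpos
      have hsplit := mod_two_pow_succ (Int.not (PySem.Int.bxor a b)) (PySem.Int.bitLength (a >>> 1))
      rw [not_bxor_shiftRight] at hsplit
      have hcond := mod_not_bxor_two a b
      by_cases hpar : PySem.Int.band a 1 = PySem.Int.band b 1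
      · rw [if_pos hpar]
        rw [PySem.Int.band_one, PySem.Int.band_one] at hpar
        rw [bor_high_bit xn c hxn0 hxnc]
        rw [ih _ hlt (a >>> 1) rfl hshift0 (b >>> 1) (xn + 2^c) (c+1) (by positivity)
            (by rw [pow_succ]; omega)]
        rw [hbl, hsplit, hcond, if_pos hpar]
        ring
      · rw [if_neg hpar]
        rw [PySem.Int.band_one, PySem.Int.band_one] at hpar
        rw [ih _ hlt (a >>> 1) rfl hshift0 (b >>> 1) xn (c+1) hxn0
            (by rw [pow_succ]; omega)]
        rw [hbl, hsplit, hcond, if_neg hpar]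
        ring

-- ===== VERDICT (by name: the statement is the Claim_ definition above) =====
theorem myXNOR_spec : Claim_equal_myXNOR := by
  intro a b _hdom hpre
  unfold Spec_myXNOR myXNOR myXNOR_alt
  by_cases h00 : a = 0 ∧ b = 0
  · simp [h00]
  · rw [if_neg h00, if_neg h00]
    have := loop_closed_form a.toNat a rfl hpre b 0 0 (by omega) (by norm_num)
    rw [this, one_shiftLeft_int]
    ring
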